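-- pv_equiv track=rewrite | github.com/suddi/coding-challenges | python/arrays/reverse_without_special_characters.py | solution
-- ===== SOURCE A (Python) =====
-- def solution(A):                                                    # O(N/2)
--     """
--     Write a function to reverse a list without affecting special characters and
--     without using the built-in function.
--
--     >>> solution(['a', ',', 'b', '$', 'c'])
--     ['c', ',', 'b', '$', 'a']
--     >>> solution(['A', 'b', ',', 'c', ',', 'd', 'e', '!', '$'])
--     ['e', 'd', ',', 'c', ',', 'b', 'A', '!', '$']
--     """
--     i = 0                                                           # O(1)
--     j = len(A) - 1                                                  # O(1)
--
--     while i < j:                                                    # O(N/2)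
--         if not A[i].isalpha():                                      # O(1)
--             i += 1                                                  # O(1)
--
--         if not A[j].isalpha():                                      # O(1)
--             j -= 1                                                  # O(1)
--
--         if A[i].isalpha() and A[j].isalpha():                       # O(1)
--             A[i], A[j] = A[j], A[i]                                 # O(1)
--             i += 1                                                  # O(1)
--             j -= 1                                                  # O(1)
--     return A                                                        # O(1)
-- ===== SOURCE B (Python) =====
-- def solution(A):
--     # Two passes: collect alphabetic elements, then write them back in reverse
--     # order (popping from the end), mutating A in place like the original.
--     letters = [c for c in A if c.isalpha()]
--     for k in range(len(A)):
--         if A[k].isalpha():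
--             A[k] = letters.pop()
--     return A
-- ===== Notes on version B (the rewrite author's own statement) =====
-- stated objective: simpler
-- what changed: Replaces A's converging two-pointer swap loop (with its intertwined per-iteration index adjustments) by two plain passes: collect the alphabetic elements with a comprehension, then walk the list once writing them back from the end via letters.pop().
import Mathlib
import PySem

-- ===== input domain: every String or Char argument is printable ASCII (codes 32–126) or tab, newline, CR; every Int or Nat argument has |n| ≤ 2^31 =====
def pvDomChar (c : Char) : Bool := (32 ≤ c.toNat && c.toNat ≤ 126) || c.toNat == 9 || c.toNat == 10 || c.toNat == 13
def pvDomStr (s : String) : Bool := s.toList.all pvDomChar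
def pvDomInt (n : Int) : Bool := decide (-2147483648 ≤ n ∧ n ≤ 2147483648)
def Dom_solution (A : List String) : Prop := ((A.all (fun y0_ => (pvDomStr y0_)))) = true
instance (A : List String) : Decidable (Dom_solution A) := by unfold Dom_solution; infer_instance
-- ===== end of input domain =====

-- B replaces A's converging two-pointer swap loop by two plain passes (collect the
-- alphabetic elements, then write them back from the end); objective: simpler.
-- Both Pythons mutate A in place and return it; the equivalence proved here is about
-- the returned value (B performs the same in-place mutation).

-- ===== PORT A =====
def solGo (A : List String) (i j : Nat) : List String :=
  if i < j then
    let i1 := if PySem.Str.strIsalpha (A.getD i "") = false then i + 1 else i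
    let j1 := if PySem.Str.strIsalpha (A.getD j "") = false then j - 1 else j
    if PySem.Str.strIsalpha (A.getD i1 "") && PySem.Str.strIsalpha (A.getD j1 "") then
      solGo ((A.set i1 (A.getD j1 "")).set j1 (A.getD i1 "")) (i1 + 1) (j1 - 1)
    else
      solGo A i1 j1
  else A
termination_by j - i
decreasing_by
  all_goals (try simp only [i1, j1] at *); split_ifs at * <;> first | omega | (exfalso; simp_all)

def solution (A : List String) : List String := solGo A 0 (A.length - 1)

-- ===== PORT B =====
-- pass 2 of Source B: walk A front to back; at each alphabetic element pop the last
-- collected letter (List.getLast?/dropLast = list.pop()).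
def altGo : List String → List String → List String
  | [], _ => []
  | c :: rest, letters =>
    if PySem.Str.strIsalpha c then
      letters.getLast?.getD "" :: altGo rest letters.dropLast
    else c :: altGo rest letters

def solution_alt (A : List String) : List String :=
  altGo A (A.filter (fun c => PySem.Str.strIsalpha c))

-- ===== PRECONDITION & SPEC =====
def Spec_solution (A : List String) (out : List String) : Prop := out = solution_alt A
instance (A : List String) (out : List String) : Decidable (Spec_solution A out) := by unfold Spec_solution; infer_instance

-- ===== CLAIM (what is proved, stated in full; the proofs are below) =====
def Claim_equal_solution : Prop := ∀ (A : List String), Dom_solution A → Spec_solution A (solution A)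

-- ===== LEMMAS AND PROOFS =====

-- `fill s ls` writes the letters of ls, in order, into the alphabetic positions of s.
def fill : List String → List String → List String
  | [], _ => []
  | c :: rest, ls =>
    if PySem.Str.strIsalpha c then ls.headD "" :: fill rest ls.tail
    else c :: fill rest ls

-- the common normal form: reversed alphabetic subsequence written back in place
def fillRev (s : List String) : List String :=
  fill s ((s.filter (fun c => PySem.Str.strIsalpha c)).reverse)

theorem altGo_eq_fill (s : List String) : ∀ ls, altGo s ls = fill s ls.reverse := by
  induction s with
  | nil => intro ls; rfl
  | cons c rest ih =>
    intro ls
    by_cases hc : PySem.Chars.strIsalpha c.toList = true <;>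
      simp [altGo, fill, hc, ih, List.tail_reverse]

theorem fill_append (m r : List String) : ∀ ls, fill (m ++ r) ls =
    fill m ls ++ fill r (ls.drop (m.filter (fun c => PySem.Str.strIsalpha c)).length) := by
  induction m with
  | nil => intro ls; simp [fill]
  | cons c rest ih =>
    intro ls
    by_cases hc : PySem.Chars.strIsalpha c.toList = true <;>
      simp [fill, hc, ih, List.drop_tail]

theorem fill_of_filter_nil {s : List String} (h : s.filter (fun c => PySem.Str.strIsalpha c) = []) :
    ∀ ls, fill s ls = s := by
  induction s with
  | nil => intro ls; rfl
  | cons c rest ih =>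
    intro ls
    by_cases hc : PySem.Chars.strIsalpha c.toList = true
    · simp [hc] at h
    · simp only [List.filter_cons] at h
      simp only [PySem.Str.strIsalpha_eq, hc, Bool.false_eq_true, if_false] at h
      simp [fill, hc, ih h]

theorem fill_long {s : List String} : ∀ {xs : List String} (ys : List String),
    (s.filter (fun c => PySem.Str.strIsalpha c)).length ≤ xs.length →
    fill s (xs ++ ys) = fill s xs := by
  induction s with
  | nil => intro xs ys _; rfl
  | cons c rest ih =>
    intro xs ys h
    by_cases hc : PySem.Chars.strIsalpha c.toList = true
    · simp only [List.filter_cons, PySem.Str.strIsalpha_eq, hc, if_pos, List.length_cons] at h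
      match xs with
      | [] => simp at h
      | x :: xs' =>
        simp only [List.cons_append, fill, PySem.Str.strIsalpha_eq, hc, if_pos,
          List.headD_cons, List.tail_cons]
        rw [ih ys (by simpa using h)]
    · simp only [List.filter_cons, PySem.Str.strIsalpha_eq, hc, Bool.false_eq_true, if_false] at h
      simp only [fill, PySem.Str.strIsalpha_eq, hc, Bool.false_eq_true, if_false]
      rw [ih ys h]

theorem fillRev_struct (p m s : List String) (a b : String)
    (hp : p.filter (fun c => PySem.Str.strIsalpha c) = [])
    (hs : s.filter (fun c => PySem.Str.strIsalpha c) = [])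
    (ha : PySem.Chars.strIsalpha a.toList = true) (hb : PySem.Chars.strIsalpha b.toList = true) :
    fillRev (p ++ (a :: (m ++ (b :: s)))) = p ++ (b :: (fillRev m ++ (a :: s))) := by
  unfold fillRev
  have hfil : (p ++ (a :: (m ++ (b :: s)))).filter (fun c => PySem.Str.strIsalpha c)
      = a :: (m.filter (fun c => PySem.Str.strIsalpha c) ++ [b]) := by
    have hp' := hp; have hs' := hs
    simp only [PySem.Str.strIsalpha_eq] at hp' hs'
    simp [List.filter_append, hp', hs', ha, hb]
  rw [hfil]
  have hrev : (a :: (m.filter (fun c => PySem.Str.strIsalpha c) ++ [b])).reverse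
      = b :: ((m.filter (fun c => PySem.Str.strIsalpha c)).reverse ++ [a]) := by simp
  rw [hrev, fill_append p, fill_of_filter_nil hp, hp]
  simp only [List.length_nil, List.drop_zero]
  have h1 : fill (a :: (m ++ (b :: s)))
        (b :: ((m.filter (fun c => PySem.Str.strIsalpha c)).reverse ++ [a]))
      = b :: fill (m ++ (b :: s)) ((m.filter (fun c => PySem.Str.strIsalpha c)).reverse ++ [a]) := by
    simp [fill, ha]
  rw [h1, fill_append m (b :: s)]
  have hdrop : (((m.filter (fun c => PySem.Str.strIsalpha c)).reverse ++ [a])).drop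
      (m.filter (fun c => PySem.Str.strIsalpha c)).length = [a] := by
    simpa using List.drop_left (m.filter (fun c => PySem.Str.strIsalpha c)).reverse [a]
  rw [hdrop]
  rw [fill_long [a] (by simp)]
  have h2 : fill (b :: s) [a] = a :: s := by
    simp [fill, hb, fill_of_filter_nil hs]
  rw [h2]

theorem fillRev_cons_nonalpha {x : String} (hx : PySem.Chars.strIsalpha x.toList = false)
    (m : List String) : fillRev (x :: m) = x :: fillRev m := by
  simp [fillRev, hx, fill]

theorem fillRev_append_nonalpha {x : String} (hx : PySem.Chars.strIsalpha x.toList = false)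
    (m : List String) : fillRev (m ++ [x]) = fillRev m ++ [x] := by
  unfold fillRev
  rw [fill_append m [x]]
  simp [List.filter_append, hx, fill]

theorem fillRev_singleton (c : String) : fillRev [c] = [c] := by
  by_cases hc : PySem.Chars.strIsalpha c.toList = true <;>
    simp [fillRev, hc, fill]

theorem fillRev_nil : fillRev [] = [] := by
  simp [fillRev, fill]

theorem seg_cons (A : List String) (i j : Nat) (hij : i ≤ j) (hj : j < A.length) :
    (A.drop i).take (j + 1 - i) = A[i]'(by omega) :: (A.drop (i + 1)).take (j - i) := by
  rw [← List.getElem_cons_drop (show i < A.length by omega),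
    show j + 1 - i = (j - i) + 1 by omega, List.take_succ_cons]

theorem seg_snoc (A : List String) (i j : Nat) (hij : i ≤ j) (hj : j < A.length) :
    (A.drop i).take (j + 1 - i) = (A.drop i).take (j - i) ++ [A[j]'hj] := by
  have h1 : j - i < (A.drop i).length := by simp; omega
  have h2 : (A.drop i)[j - i]'h1 = A[j]'hj := by
    rw [List.getElem_drop]; congr 1; omega
  rw [show j + 1 - i = (j - i) + 1 by omega, List.take_succ_eq_append_getElem h1, h2]

theorem seg_set_low (A : List String) (p : Nat) (x : String) (i k : Nat) (h : p < i) :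
    ((A.set p x).drop i).take k = (A.drop i).take k := by
  rw [List.drop_set_of_lt h]

theorem seg_set_high (A : List String) (p : Nat) (x : String) (i k : Nat) (h : i + k ≤ p) :
    ((A.set p x).drop i).take k = (A.drop i).take k := by
  rw [List.drop_set]
  split_ifs with hpi
  · rfl
  · rw [List.take_set_of_le (by omega)]

theorem solGo_base (A : List String) (i j : Nat) (hj : j < A.length) (hij : i ≤ j + 1)
    (h : ¬ i < j) :
    A = A.take i ++ fillRev ((A.drop i).take (j + 1 - i)) ++ A.drop (j + 1) := by
  rcases Nat.lt_or_ge i (j + 1) with h1 | h1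
  · have hij' : i = j := by omega
    subst hij'
    have hseg : (A.drop i).take (i + 1 - i) = [A[i]'hj] := by
      have h0 : (0 : Nat) < (A.drop i).length := by simp; omega
      have hz : (A.drop i)[0]'h0 = A[i]'hj := by rw [List.getElem_drop]; congr 1
      rw [show i + 1 - i = 0 + 1 by omega, List.take_succ_eq_append_getElem h0, hz]
      simp
    rw [hseg, fillRev_singleton]
    calc A = A.take i ++ A.drop i := (List.take_append_drop i A).symm
      _ = A.take i ++ (A[i]'hj :: A.drop (i + 1)) := by rw [List.getElem_cons_drop hj]
      _ = A.take i ++ [A[i]'hj] ++ A.drop (i + 1) := by simp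
  · have hij' : i = j + 1 := by omega
    subst hij'
    simp [fillRev_nil]

theorem take_cons_getElem (A : List String) (i : Nat) (h : i < A.length) (rest : List String) :
    A.take i ++ (A[i]'h) :: rest = A.take (i + 1) ++ rest := by
  rw [List.take_succ_eq_append_getElem h, List.append_assoc, List.singleton_append]

theorem solGo_eq : ∀ (n : Nat) (A : List String) (i j : Nat), j - i ≤ n → j < A.length → i ≤ j + 1 →
    solGo A i j = A.take i ++ fillRev ((A.drop i).take (j + 1 - i)) ++ A.drop (j + 1) := by
  intro n
  induction n with
  | zero =>
    intro A i j hn hj hij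
    have hlt : ¬ i < j := by omega
    rw [solGo, if_neg hlt]
    exact solGo_base A i j hj hij hlt
  | succ n ih =>
    intro A i j hn hj hij
    by_cases hlt : i < j
    · have hi : i < A.length := by omega
      have hsome_i : A[i]? = some (A[i]'hi) := List.getElem?_eq_getElem hi
      have hsome_j : A[j]? = some (A[j]'hj) := List.getElem?_eq_getElem hj
      rw [solGo, if_pos hlt]
      by_cases hai : PySem.Chars.strIsalpha (A[i]'hi).toList = true
      · by_cases haj : PySem.Chars.strIsalpha (A[j]'hj).toList = true
        · -- CASE 1: both ends alphabetic; swap and recurse on the interior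
          simp only [List.getD_eq_getElem?_getD, hsome_i, hsome_j, Option.getD_some,
            PySem.Str.strIsalpha_eq, hai, haj, Bool.true_eq_false, if_false, Bool.and_self,
            if_true, ite_true, ite_false]
          have hj1 : j - 1 < ((A.set i (A[j]'hj)).set j (A[i]'hi)).length := by
            rw [List.length_set, List.length_set]; omega
          rw [ih _ (i + 1) (j - 1) (by omega) hj1 (by omega)]
          rw [show j - 1 + 1 = j by omega]
          have e1 : ((A.set i (A[j]'hj)).set j (A[i]'hi)).take (i + 1)
              = A.take i ++ [A[j]'hj] := by
            rw [List.take_set_of_le (by omega),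
              List.take_succ_eq_append_getElem (by rw [List.length_set]; omega),
              List.take_set_of_le (le_refl i)]
            simp [List.getElem_set]
          have e2 : ((A.set i (A[j]'hj)).set j (A[i]'hi)).drop j
              = (A[i]'hi) :: A.drop (j + 1) := by
            rw [List.drop_eq_getElem_cons (l := (A.set i (A[j]'hj)).set j (A[i]'hi))
              (by rw [List.length_set, List.length_set]; omega)]
            rw [List.getElem_set_self, List.drop_set_of_lt (by omega),
              List.drop_set_of_lt (by omega)]
          have e3 : (((A.set i (A[j]'hj)).set j (A[i]'hi)).drop (i + 1)).take (j - (i + 1))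
              = (A.drop (i + 1)).take (j - (i + 1)) := by
            rw [seg_set_high _ j _ _ _ (by omega), seg_set_low _ i _ _ _ (by omega)]
          have e4 : (A.drop i).take (j + 1 - i)
              = [] ++ ((A[i]'hi) :: (((A.drop (i + 1)).take (j - (i + 1))) ++ ((A[j]'hj) :: []))) := by
            rw [seg_cons A i j (by omega) hj]
            simp only [List.nil_append]
            congr 1
            rw [show j - i = j + 1 - (i + 1) by omega, seg_snoc A (i + 1) j (by omega) hj]
          rw [e1, e2, e3, e4, fillRev_struct _ _ _ _ _ (by simp) (by simp) hai haj]
          simp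
        · -- CASE 2: left alphabetic, right not
          have haj' : PySem.Chars.strIsalpha (A[j]'hj).toList = false := by
            simpa using haj
          by_cases hj2 : j = i + 1
          · subst hj2
            simp only [List.getD_eq_getElem?_getD, Nat.add_sub_cancel, hsome_i, hsome_j,
              Option.getD_some, PySem.Str.strIsalpha_eq, hai, haj', Bool.true_eq_false,
              Bool.false_eq_true, if_false, if_true, ite_true, ite_false, eq_self_iff_true,
              Bool.and_self]
            rw [List.set_getElem_self, List.set_getElem_self, solGo, if_neg (by omega)]
            rw [seg_cons A i (i + 1) (by omega) hj, show i + 1 - i = i + 1 + 1 - (i + 1) by omega,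
              seg_cons A (i + 1) (i + 1) (by omega) hj]
            simp only [Nat.sub_self, List.take_zero]
            rw [show (A[i]'hi) :: (A[i + 1]'hj) :: ([] : List String)
                = [A[i]'hi] ++ [A[i + 1]'hj] by simp,
              fillRev_append_nonalpha haj', fillRev_singleton]
            calc A = A.take i ++ A.drop i := (List.take_append_drop i A).symm
              _ = A.take i ++ ((A[i]'hi) :: A.drop (i + 1)) := by
                  rw [← List.drop_eq_getElem_cons hi]
              _ = A.take i ++ ((A[i]'hi) :: ((A[i + 1]'hj) :: A.drop (i + 2))) := by
                  rw [← List.drop_eq_getElem_cons hj]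
              _ = A.take i ++ ([A[i]'hi] ++ [A[i + 1]'hj]) ++ A.drop (i + 1 + 1) := by simp
          · have hj1lt : j - 1 < A.length := by omega
            have hij1 : i < j - 1 := by omega
            have hsome_j1 : A[j - 1]? = some (A[j - 1]'hj1lt) := List.getElem?_eq_getElem hj1lt
            simp only [List.getD_eq_getElem?_getD, hsome_i, hsome_j, hsome_j1, Option.getD_some,
              PySem.Str.strIsalpha_eq, hai, haj', Bool.true_eq_false, Bool.false_eq_true,
              if_false, if_true, ite_true, ite_false, eq_self_iff_true, Bool.true_and]
            by_cases hb : PySem.Chars.strIsalpha (A[j - 1]'hj1lt).toList = true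
            · simp only [hb, if_true, ite_true]
              rw [show j - 1 - 1 = j - 2 by omega]
              have hj1' : j - 2 < ((A.set i (A[j - 1]'hj1lt)).set (j - 1) (A[i]'hi)).length := by
                rw [List.length_set, List.length_set]; omega
              rw [ih _ (i + 1) (j - 2) (by omega) hj1' (by omega)]
              rw [show j - 2 + 1 = j - 1 by omega]
              have e1 : ((A.set i (A[j - 1]'hj1lt)).set (j - 1) (A[i]'hi)).take (i + 1)
                  = A.take i ++ [A[j - 1]'hj1lt] := by
                rw [List.take_set_of_le (by omega),
                  List.take_succ_eq_append_getElem (by rw [List.length_set]; omega),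
                  List.take_set_of_le (le_refl i)]
                simp [List.getElem_set]
              have e2 : ((A.set i (A[j - 1]'hj1lt)).set (j - 1) (A[i]'hi)).drop (j - 1)
                  = (A[i]'hi) :: (A[j]'hj) :: A.drop (j + 1) := by
                rw [List.drop_eq_getElem_cons (l := (A.set i (A[j - 1]'hj1lt)).set (j - 1) (A[i]'hi))
                  (by rw [List.length_set, List.length_set]; omega)]
                rw [List.getElem_set_self, show j - 1 + 1 = j by omega,
                  List.drop_set_of_lt (by omega), List.drop_set_of_lt (by omega),
                  List.drop_eq_getElem_cons hj]
              have e3 : (((A.set i (A[j - 1]'hj1lt)).set (j - 1) (A[i]'hi)).drop (i + 1)).take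
                    (j - 1 - (i + 1))
                  = (A.drop (i + 1)).take (j - 1 - (i + 1)) := by
                rw [seg_set_high _ (j - 1) _ _ _ (by omega), seg_set_low _ i _ _ _ (by omega)]
              have e4 : (A.drop i).take (j + 1 - i)
                  = [] ++ ((A[i]'hi) :: (((A.drop (i + 1)).take (j - 1 - (i + 1)))
                      ++ ((A[j - 1]'hj1lt) :: [A[j]'hj]))) := by
                rw [seg_cons A i j (by omega) hj, show j - i = j + 1 - (i + 1) by omega,
                  seg_snoc A (i + 1) j (by omega) hj,
                  show j - (i + 1) = j - 1 + 1 - (i + 1) by omega,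
                  seg_snoc A (i + 1) (j - 1) (by omega) hj1lt]
                simp
              rw [e1, e2, e3, e4, fillRev_struct _ _ _ _ _ (by simp) (by simp [haj']) hai hb]
              simp
            · simp only [hb, if_false, ite_false, Bool.false_eq_true]
              rw [ih A i (j - 1) (by omega) hj1lt (by omega)]
              rw [show j - 1 + 1 = j by omega]
              rw [seg_snoc A i j (by omega) hj, fillRev_append_nonalpha haj',
                List.drop_eq_getElem_cons hj, show j - i = j - 1 + 1 - i by omega]
              simp
      · by_cases haj : PySem.Chars.strIsalpha (A[j]'hj).toList = true
        · -- CASE 3: left not alphabetic, right alphabetic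
          have hai' : PySem.Chars.strIsalpha (A[i]'hi).toList = false := by
            simpa using hai
          by_cases hj2 : j = i + 1
          · subst hj2
            simp only [List.getD_eq_getElem?_getD, hsome_i, hsome_j, Option.getD_some,
              PySem.Str.strIsalpha_eq, hai', haj, Bool.true_eq_false, Bool.false_eq_true,
              if_false, if_true, ite_true, ite_false, eq_self_iff_true, Bool.and_self]
            rw [List.set_getElem_self, List.set_getElem_self, solGo, if_neg (by omega)]
            rw [seg_cons A i (i + 1) (by omega) hj, show i + 1 - i = i + 1 + 1 - (i + 1) by omega,
              seg_cons A (i + 1) (i + 1) (by omega) hj]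
            simp only [Nat.sub_self, List.take_zero]
            rw [fillRev_cons_nonalpha hai', fillRev_singleton]
            calc A = A.take i ++ A.drop i := (List.take_append_drop i A).symm
              _ = A.take i ++ ((A[i]'hi) :: A.drop (i + 1)) := by
                  rw [← List.drop_eq_getElem_cons hi]
              _ = A.take i ++ ((A[i]'hi) :: ((A[i + 1]'hj) :: A.drop (i + 2))) := by
                  rw [← List.drop_eq_getElem_cons hj]
              _ = A.take i ++ ((A[i]'hi) :: [A[i + 1]'hj]) ++ A.drop (i + 1 + 1) := by simp
          · have hi1lt : i + 1 < A.length := by omega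
            have hij1 : i + 1 < j := by omega
            have hsome_i1 : A[i + 1]? = some (A[i + 1]'hi1lt) := List.getElem?_eq_getElem hi1lt
            simp only [List.getD_eq_getElem?_getD, hsome_i, hsome_j, hsome_i1, Option.getD_some,
              PySem.Str.strIsalpha_eq, hai', haj, Bool.true_eq_false, Bool.false_eq_true,
              if_false, if_true, ite_true, ite_false, eq_self_iff_true, Bool.and_true]
            by_cases hb : PySem.Chars.strIsalpha (A[i + 1]'hi1lt).toList = true
            · simp only [hb, if_true, ite_true]
              rw [show i + 1 + 1 = i + 2 by omega]
              have hj1' : j - 1 < ((A.set (i + 1) (A[j]'hj)).set j (A[i + 1]'hi1lt)).length := by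
                rw [List.length_set, List.length_set]; omega
              rw [ih _ (i + 2) (j - 1) (by omega) hj1' (by omega)]
              rw [show j - 1 + 1 = j by omega]
              have e1 : ((A.set (i + 1) (A[j]'hj)).set j (A[i + 1]'hi1lt)).take (i + 2)
                  = (A.take i ++ [A[i]'hi]) ++ [A[j]'hj] := by
                rw [List.take_set_of_le (by omega),
                  List.take_succ_eq_append_getElem (by rw [List.length_set]; omega),
                  List.take_set_of_le (by omega), List.take_succ_eq_append_getElem hi]
                simp [List.getElem_set]
              have e2 : ((A.set (i + 1) (A[j]'hj)).set j (A[i + 1]'hi1lt)).drop j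
                  = (A[i + 1]'hi1lt) :: A.drop (j + 1) := by
                rw [List.drop_eq_getElem_cons
                  (l := (A.set (i + 1) (A[j]'hj)).set j (A[i + 1]'hi1lt))
                  (by rw [List.length_set, List.length_set]; omega)]
                rw [List.getElem_set_self, List.drop_set_of_lt (by omega),
                  List.drop_set_of_lt (by omega)]
              have e3 : (((A.set (i + 1) (A[j]'hj)).set j (A[i + 1]'hi1lt)).drop (i + 2)).take
                    (j - (i + 2))
                  = (A.drop (i + 2)).take (j - (i + 2)) := by
                rw [seg_set_high _ j _ _ _ (by omega), seg_set_low _ (i + 1) _ _ _ (by omega)]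
              have e4 : (A.drop i).take (j + 1 - i)
                  = [A[i]'hi] ++ ((A[i + 1]'hi1lt) :: (((A.drop (i + 2)).take (j - (i + 2)))
                      ++ ((A[j]'hj) :: []))) := by
                rw [seg_cons A i j (by omega) hj, show j - i = j + 1 - (i + 1) by omega,
                  seg_cons A (i + 1) j (by omega) hj,
                  show j - (i + 1) = j + 1 - (i + 2) by omega,
                  seg_snoc A (i + 2) j (by omega) hj]
                simp
              rw [e1, e2, e3, e4, fillRev_struct _ _ _ _ _ (by simp [hai']) (by simp) hb haj]
              simp
              rw [take_cons_getElem A i hi]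
            · simp only [hb, if_false, ite_false, Bool.false_eq_true]
              rw [ih A (i + 1) j (by omega) hj (by omega)]
              rw [seg_cons A i j (by omega) hj, fillRev_cons_nonalpha hai',
                show j - i = j + 1 - (i + 1) by omega]
              simp
              rw [take_cons_getElem A i hi]
        · -- CASE 4: neither end alphabetic
          have hai' : PySem.Chars.strIsalpha (A[i]'hi).toList = false := by
            simpa using hai
          have haj' : PySem.Chars.strIsalpha (A[j]'hj).toList = false := by
            simpa using haj
          by_cases hj2 : j = i + 1
          · subst hj2
            simp only [List.getD_eq_getElem?_getD, Nat.add_sub_cancel, hsome_i, hsome_j,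
              Option.getD_some, PySem.Str.strIsalpha_eq, hai', haj', Bool.true_eq_false,
              Bool.false_eq_true, if_false, if_true, ite_true, ite_false, eq_self_iff_true,
              Bool.and_self, Bool.and_false, Bool.false_and]
            rw [ih A (i + 1) i (by omega) hi (by omega)]
            simp only [Nat.sub_self, List.take_zero, fillRev_nil, List.nil_append,
              List.append_nil, List.take_append_drop]
            rw [seg_cons A i (i + 1) (by omega) hj, show i + 1 - i = i + 1 + 1 - (i + 1) by omega,
              seg_cons A (i + 1) (i + 1) (by omega) hj]
            simp only [Nat.sub_self, List.take_zero]
            rw [fillRev_cons_nonalpha hai', fillRev_singleton]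
            calc A = A.take i ++ A.drop i := (List.take_append_drop i A).symm
              _ = A.take i ++ ((A[i]'hi) :: A.drop (i + 1)) := by
                  rw [← List.drop_eq_getElem_cons hi]
              _ = A.take i ++ ((A[i]'hi) :: ((A[i + 1]'hj) :: A.drop (i + 2))) := by
                  rw [← List.drop_eq_getElem_cons hj]
              _ = A.take i ++ ((A[i]'hi) :: [A[i + 1]'hj]) ++ A.drop (i + 1 + 1) := by simp
          · have hi1lt : i + 1 < A.length := by omega
            have hj1lt : j - 1 < A.length := by omega
            have hij1 : i + 1 < j := by omega
            have hsome_i1 : A[i + 1]? = some (A[i + 1]'hi1lt) := List.getElem?_eq_getElem hi1lt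
            have hsome_j1 : A[j - 1]? = some (A[j - 1]'hj1lt) := List.getElem?_eq_getElem hj1lt
            simp only [List.getD_eq_getElem?_getD, hsome_i, hsome_j, hsome_i1, hsome_j1,
              Option.getD_some, PySem.Str.strIsalpha_eq, hai', haj', Bool.true_eq_false,
              Bool.false_eq_true, if_false, if_true, ite_true, ite_false, eq_self_iff_true]
            by_cases hcond : (PySem.Chars.strIsalpha (A[i + 1]'hi1lt).toList
                && PySem.Chars.strIsalpha (A[j - 1]'hj1lt).toList) = true
            · obtain ⟨hb1, hb2⟩ := (Bool.and_eq_true _ _).mp hcond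
              simp only [hcond, if_true, ite_true]
              by_cases hj3 : j = i + 2
              · subst hj3
                simp only [show i + 2 - 1 = i + 1 from by omega] at hb2 ⊢
                rw [List.set_getElem_self, List.set_getElem_self, solGo, if_neg (by omega)]
                rw [seg_cons A i (i + 2) (by omega) hj,
                  show i + 2 - i = i + 2 + 1 - (i + 1) by omega,
                  seg_cons A (i + 1) (i + 2) (by omega) hj,
                  show i + 2 - (i + 1) = i + 2 + 1 - (i + 2) by omega,
                  seg_cons A (i + 2) (i + 2) (by omega) hj]
                simp only [Nat.sub_self, List.take_zero]
                rw [fillRev_cons_nonalpha hai',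
                  show (A[i + 1]'hi1lt) :: (A[i + 2]'hj) :: ([] : List String)
                    = [A[i + 1]'hi1lt] ++ [A[i + 2]'hj] by simp,
                  fillRev_append_nonalpha haj', fillRev_singleton]
                calc A = A.take i ++ A.drop i := (List.take_append_drop i A).symm
                  _ = A.take i ++ ((A[i]'hi) :: A.drop (i + 1)) := by
                      rw [← List.drop_eq_getElem_cons hi]
                  _ = A.take i ++ ((A[i]'hi) :: ((A[i + 1]'hi1lt) :: A.drop (i + 2))) := by
                      rw [← List.drop_eq_getElem_cons hi1lt]
                  _ = A.take i ++ ((A[i]'hi) :: ((A[i + 1]'hi1lt) :: ((A[i + 2]'hj)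
                        :: A.drop (i + 3)))) := by rw [← List.drop_eq_getElem_cons hj]
                  _ = A.take i ++ ((A[i]'hi) :: ([A[i + 1]'hi1lt] ++ [A[i + 2]'hj]))
                        ++ A.drop (i + 2 + 1) := by simp
              · have hij2 : i + 2 < j := by omega
                rw [show i + 1 + 1 = i + 2 by omega, show j - 1 - 1 = j - 2 by omega]
                have hj1' : j - 2
                    < ((A.set (i + 1) (A[j - 1]'hj1lt)).set (j - 1) (A[i + 1]'hi1lt)).length := by
                  rw [List.length_set, List.length_set]; omega
                rw [ih _ (i + 2) (j - 2) (by omega) hj1' (by omega)]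
                rw [show j - 2 + 1 = j - 1 by omega]
                have e1 : ((A.set (i + 1) (A[j - 1]'hj1lt)).set (j - 1) (A[i + 1]'hi1lt)).take (i + 2)
                    = (A.take i ++ [A[i]'hi]) ++ [A[j - 1]'hj1lt] := by
                  rw [List.take_set_of_le (by omega),
                    List.take_succ_eq_append_getElem (by rw [List.length_set]; omega),
                    List.take_set_of_le (by omega), List.take_succ_eq_append_getElem hi]
                  simp [List.getElem_set]
                have e2 : ((A.set (i + 1) (A[j - 1]'hj1lt)).set (j - 1) (A[i + 1]'hi1lt)).drop (j - 1)
                    = (A[i + 1]'hi1lt) :: (A[j]'hj) :: A.drop (j + 1) := by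
                  rw [List.drop_eq_getElem_cons
                    (l := (A.set (i + 1) (A[j - 1]'hj1lt)).set (j - 1) (A[i + 1]'hi1lt))
                    (by rw [List.length_set, List.length_set]; omega)]
                  rw [List.getElem_set_self, show j - 1 + 1 = j by omega,
                    List.drop_set_of_lt (by omega), List.drop_set_of_lt (by omega),
                    List.drop_eq_getElem_cons hj]
                have e3 : (((A.set (i + 1) (A[j - 1]'hj1lt)).set (j - 1) (A[i + 1]'hi1lt)).drop
                      (i + 2)).take (j - 1 - (i + 2))
                    = (A.drop (i + 2)).take (j - 1 - (i + 2)) := by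
                  rw [seg_set_high _ (j - 1) _ _ _ (by omega), seg_set_low _ (i + 1) _ _ _ (by omega)]
                have e4 : (A.drop i).take (j + 1 - i)
                    = [A[i]'hi] ++ ((A[i + 1]'hi1lt) :: (((A.drop (i + 2)).take (j - 1 - (i + 2)))
                        ++ ((A[j - 1]'hj1lt) :: [A[j]'hj]))) := by
                  rw [seg_cons A i j (by omega) hj, show j - i = j + 1 - (i + 1) by omega,
                    seg_cons A (i + 1) j (by omega) hj,
                    show j - (i + 1) = j + 1 - (i + 2) by omega,
                    seg_snoc A (i + 2) j (by omega) hj,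
                    show j - (i + 2) = j - 1 + 1 - (i + 2) by omega,
                    seg_snoc A (i + 2) (j - 1) (by omega) hj1lt]
                  simp
                rw [e1, e2, e3, e4, fillRev_struct _ _ _ _ _ (by simp [hai']) (by simp [haj']) hb1 hb2]
                simp
                rw [take_cons_getElem A i hi]
            · simp only [hcond, if_false, ite_false, Bool.false_eq_true]
              rw [ih A (i + 1) (j - 1) (by omega) hj1lt (by omega)]
              rw [show j - 1 + 1 = j by omega]
              rw [seg_cons A i j (by omega) hj, show j - i = j + 1 - (i + 1) by omega,
                seg_snoc A (i + 1) j (by omega) hj, fillRev_cons_nonalpha hai',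
                fillRev_append_nonalpha haj', List.drop_eq_getElem_cons hj,
                show j - (i + 1) = j - 1 + 1 - (i + 1) by omega]
              simp
              rw [take_cons_getElem A i hi]
    · rw [solGo, if_neg hlt]
      exact solGo_base A i j hj hij hlt

theorem solution_eq_fillRev (A : List String) : solution A = fillRev A := by
  match A with
  | [] => simp [solution, solGo, fillRev, fill]
  | x :: xs =>
    rw [solution, solGo_eq (x :: xs).length (x :: xs) 0 ((x :: xs).length - 1) (by omega)
      (by simp) (by omega)]
    rw [show (x :: xs).length - 1 + 1 = (x :: xs).length from by simp]
    simp

theorem alt_eq_fillRev (A : List String) : solution_alt A = fillRev A := by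
  rw [solution_alt, altGo_eq_fill]; rfl

-- ===== VERDICT (by name: the statement is the Claim_ definition above) =====
theorem solution_spec : Claim_equal_solution := by
  intro A _
  unfold Spec_solution
  rw [solution_eq_fillRev, alt_eq_fillRev]
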